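-- pv_equiv track=rewrite | github.com/lukius/mts | set3/challenge23.py | _invert_second_transformation
-- ===== SOURCE A (Python) =====
-- def _invert_second_transformation(integer):
--     # Bitmask i will project bits 7i,...,min(7i+6, 31).
--     bitmasks = [0x0000007f, 0x00003f80, 0x001fc000, 0x0fe00000, 0xf0000000]
--     result = 0
--     for bitmask in bitmasks:
--         anded = (result << 7) & 2636928640
--         bits = (integer ^ anded) & bitmask
--         result ^= bits
--     return result
-- ===== SOURCE B (Python) =====
-- def _invert_second_transformation(integer):
--     # Bit-granular inversion: recover each bit of the original word in one
--     # ascending pass; bit i only depends on the already-recovered bit i-7.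
--     result = 0
--     for i in range(32):
--         bit = (integer >> i) & 1
--         if i >= 7:
--             bit ^= ((result >> (i - 7)) & 1) & ((2636928640 >> i) & 1)
--         result |= bit << i
--     return result
-- ===== Notes on version B (the rewrite author's own statement) =====
-- stated objective: alternative
-- what changed: B inverts the tempering bit by bit in one ascending 32-iteration pass (each recovered bit i is bit i of the input XOR the product of already-recovered bit i-7 and mask bit i, OR-ed into the result), instead of A's XOR-accumulation of five 7-bit mask blocks.
import Mathlib
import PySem

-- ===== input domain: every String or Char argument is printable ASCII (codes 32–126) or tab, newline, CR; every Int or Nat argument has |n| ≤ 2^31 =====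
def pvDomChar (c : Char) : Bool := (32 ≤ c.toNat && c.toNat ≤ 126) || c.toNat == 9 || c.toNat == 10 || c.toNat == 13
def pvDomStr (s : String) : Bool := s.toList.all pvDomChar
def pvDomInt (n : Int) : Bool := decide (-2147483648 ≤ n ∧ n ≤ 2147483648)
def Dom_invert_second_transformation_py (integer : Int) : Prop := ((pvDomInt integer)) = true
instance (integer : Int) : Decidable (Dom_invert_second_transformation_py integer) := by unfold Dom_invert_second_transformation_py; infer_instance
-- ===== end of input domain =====

-- B recovers the word bit by bit in one ascending pass instead of A's five 7-bit mask blocks;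
-- objective: alternative decomposition (same cost class, no speed claim).

-- ===== PORT A =====
def invert_second_transformation_py (integer : Int) : Int :=
  let bitmasks : List Int := [0x0000007f, 0x00003f80, 0x001fc000, 0x0fe00000, 0xf0000000]
  bitmasks.foldl (fun result bitmask =>
    let anded := PySem.Int.band (result <<< (7:Nat)) 2636928640
    let bits := PySem.Int.band (PySem.Int.bxor integer anded) bitmask
    PySem.Int.bxor result bits) 0

-- ===== PORT B =====
def invert_second_transformation_py_alt (integer : Int) : Int :=
  (List.range 32).foldl (fun (result : Int) (i : Nat) =>
    let bit := PySem.Int.band (integer >>> i) 1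
    let bit := if 7 ≤ i then
        PySem.Int.bxor bit (PySem.Int.band (PySem.Int.band (result >>> (i - 7)) 1)
          (PySem.Int.band ((2636928640 : Int) >>> i) 1))
      else bit
    PySem.Int.bor result (bit <<< i)) 0

-- ===== PRECONDITION & SPEC =====
def Spec_invert_second_transformation_py (integer : Int) (out : Int) : Prop := out = invert_second_transformation_py_alt integer
instance (integer : Int) (out : Int) : Decidable (Spec_invert_second_transformation_py integer out) := by unfold Spec_invert_second_transformation_py; infer_instance

-- ===== CLAIM (what is proved, stated in full; the proofs are below) =====
def Claim_equal_invert_second_transformation_py : Prop := ∀ (integer : Int), Dom_invert_second_transformation_py integer → Spec_invert_second_transformation_py integer (invert_second_transformation_py integer)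

-- ===== LEMMAS AND PROOFS =====


theorem pvAndAddLdiff (m c : Nat) : (m &&& c) + Nat.ldiff m c = m := by
  induction m using Nat.binaryRec generalizing c with
  | zero => simp [Nat.ldiff]
  | bit b n ih =>
    rw [← Nat.bit_testBit_zero_shiftRight_one c, Nat.ldiff_bit, Nat.land_bit,
      Nat.bit_val, Nat.bit_val, Nat.bit_val]
    have := ih (c >>> 1)
    cases b <;> cases c.testBit 0 <;> simp <;> omega

theorem pvSubAnd (m c : Nat) : m - (m &&& c) = Nat.ldiff m c := by
  have h := pvAndAddLdiff m c
  omega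

theorem pvTB_ofNat (n : Nat) (i : Nat) : ((n : Int)).testBit i = Nat.testBit n i := rfl
theorem pvTB_negSucc (n : Nat) (i : Nat) : (Int.negSucc n).testBit i = !(Nat.testBit n i) := rfl

theorem pvNegSuccEq (k : Nat) : -(k:Int) - 1 = Int.negSucc k := by
  rw [Int.negSucc_eq]; ring

theorem pvNegEq (b : Int) (hb : ¬ 0 ≤ b) : b = Int.negSucc (-b - 1).toNat := by
  rw [Int.negSucc_eq]
  have h : ((-b - 1).toNat : Int) = -b - 1 := Int.toNat_of_nonneg (by omega)
  omega

theorem pvNegSimp (n : Nat) : (-Int.negSucc n - 1).toNat = n := by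
  have h : (-Int.negSucc n - 1) = (n:Int) := by rw [Int.negSucc_eq]; ring
  rw [h, Int.toNat_natCast]

theorem pvTB_band (a b : Int) (i : Nat) :
    (PySem.Int.band a b).testBit i = (a.testBit i && b.testBit i) := by
  unfold PySem.Int.band
  by_cases ha : 0 ≤ a <;> by_cases hb : 0 ≤ b <;> simp only [ha, hb, if_true, if_false]
  · obtain ⟨m, rfl⟩ := Int.eq_ofNat_of_zero_le ha
    obtain ⟨n, rfl⟩ := Int.eq_ofNat_of_zero_le hb
    simp [pvTB_ofNat, Nat.testBit_and]
  · obtain ⟨n, rfl⟩ : ∃ n, b = Int.negSucc n := ⟨(-b-1).toNat, pvNegEq b hb⟩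
    obtain ⟨m, rfl⟩ := Int.eq_ofNat_of_zero_le ha
    rw [pvNegSimp]
    simp only [Int.toNat_natCast, pvSubAnd, pvTB_ofNat, pvTB_negSucc, Nat.testBit_ldiff]
  · obtain ⟨m, rfl⟩ : ∃ m, a = Int.negSucc m := ⟨(-a-1).toNat, pvNegEq a ha⟩
    obtain ⟨n, rfl⟩ := Int.eq_ofNat_of_zero_le hb
    rw [pvNegSimp]
    simp only [Int.toNat_natCast, pvSubAnd, pvTB_ofNat, pvTB_negSucc, Nat.testBit_ldiff]
    cases Nat.testBit n i <;> cases Nat.testBit m i <;> rfl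
  · obtain ⟨m, rfl⟩ : ∃ m, a = Int.negSucc m := ⟨(-a-1).toNat, pvNegEq a ha⟩
    obtain ⟨n, rfl⟩ : ∃ n, b = Int.negSucc n := ⟨(-b-1).toNat, pvNegEq b hb⟩
    rw [pvNegSimp, pvNegSimp, pvNegSuccEq]
    simp only [pvTB_negSucc, Nat.testBit_or, Bool.not_or]

theorem pvTB_bxor (a b : Int) (i : Nat) :
    (PySem.Int.bxor a b).testBit i = xor (a.testBit i) (b.testBit i) := by
  unfold PySem.Int.bxor
  by_cases ha : 0 ≤ a <;> by_cases hb : 0 ≤ b <;> simp only [ha, hb, if_true, if_false]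
  · obtain ⟨m, rfl⟩ := Int.eq_ofNat_of_zero_le ha
    obtain ⟨n, rfl⟩ := Int.eq_ofNat_of_zero_le hb
    simp [pvTB_ofNat, Nat.testBit_xor]
  · obtain ⟨n, rfl⟩ : ∃ n, b = Int.negSucc n := ⟨(-b-1).toNat, pvNegEq b hb⟩
    obtain ⟨m, rfl⟩ := Int.eq_ofNat_of_zero_le ha
    rw [pvNegSimp, pvNegSuccEq]
    simp only [Int.toNat_natCast, pvTB_ofNat, pvTB_negSucc, Nat.testBit_xor]
    cases Nat.testBit m i <;> cases Nat.testBit n i <;> rfl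
  · obtain ⟨m, rfl⟩ : ∃ m, a = Int.negSucc m := ⟨(-a-1).toNat, pvNegEq a ha⟩
    obtain ⟨n, rfl⟩ := Int.eq_ofNat_of_zero_le hb
    rw [pvNegSimp, pvNegSuccEq]
    simp only [Int.toNat_natCast, pvTB_ofNat, pvTB_negSucc, Nat.testBit_xor]
    cases Nat.testBit m i <;> cases Nat.testBit n i <;> rfl
  · obtain ⟨m, rfl⟩ : ∃ m, a = Int.negSucc m := ⟨(-a-1).toNat, pvNegEq a ha⟩
    obtain ⟨n, rfl⟩ : ∃ n, b = Int.negSucc n := ⟨(-b-1).toNat, pvNegEq b hb⟩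
    rw [pvNegSimp, pvNegSimp]
    simp only [pvTB_ofNat, pvTB_negSucc, Nat.testBit_xor]
    cases Nat.testBit m i <;> cases Nat.testBit n i <;> rfl

theorem pvTB_bor (a b : Int) (i : Nat) :
    (PySem.Int.bor a b).testBit i = (a.testBit i || b.testBit i) := by
  unfold PySem.Int.bor
  by_cases ha : 0 ≤ a <;> by_cases hb : 0 ≤ b <;> simp only [ha, hb, if_true, if_false]
  · obtain ⟨m, rfl⟩ := Int.eq_ofNat_of_zero_le ha
    obtain ⟨n, rfl⟩ := Int.eq_ofNat_of_zero_le hb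
    simp [pvTB_ofNat, Nat.testBit_or]
  · obtain ⟨n, rfl⟩ : ∃ n, b = Int.negSucc n := ⟨(-b-1).toNat, pvNegEq b hb⟩
    obtain ⟨m, rfl⟩ := Int.eq_ofNat_of_zero_le ha
    rw [pvNegSimp, pvNegSuccEq]
    simp only [Int.toNat_natCast, pvSubAnd, pvTB_ofNat, pvTB_negSucc, Nat.testBit_ldiff]
    cases Nat.testBit m i <;> cases Nat.testBit n i <;> rfl
  · obtain ⟨m, rfl⟩ : ∃ m, a = Int.negSucc m := ⟨(-a-1).toNat, pvNegEq a ha⟩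
    obtain ⟨n, rfl⟩ := Int.eq_ofNat_of_zero_le hb
    rw [pvNegSimp, pvNegSuccEq]
    simp only [Int.toNat_natCast, pvSubAnd, pvTB_ofNat, pvTB_negSucc, Nat.testBit_ldiff]
    cases Nat.testBit m i <;> cases Nat.testBit n i <;> rfl
  · obtain ⟨m, rfl⟩ : ∃ m, a = Int.negSucc m := ⟨(-a-1).toNat, pvNegEq a ha⟩
    obtain ⟨n, rfl⟩ : ∃ n, b = Int.negSucc n := ⟨(-b-1).toNat, pvNegEq b hb⟩
    rw [pvNegSimp, pvNegSimp, pvNegSuccEq]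
    simp only [pvTB_negSucc, Nat.testBit_and, Bool.not_and]
theorem pvTB_shl (n : Nat) (k i : Nat) :
    (((n : Int)) <<< k).testBit i = (decide (k ≤ i) && Nat.testBit n (i - k)) := by
  have h : ((n : Int)) <<< k = ((n <<< k : Nat) : Int) := rfl
  rw [h, pvTB_ofNat, Nat.testBit_shiftLeft]

theorem pvTB_shr (x : Int) (k i : Nat) : (x >>> k).testBit i = x.testBit (i + k) := by
  cases x with
  | ofNat n =>
    have h : (Int.ofNat n) >>> k = Int.ofNat (n >>> k) := rfl
    rw [h]
    show Nat.testBit (n >>> k) i = Nat.testBit n (i + k)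
    rw [Nat.testBit_shiftRight, Nat.add_comm]
  | negSucc n =>
    have h : (Int.negSucc n) >>> k = Int.negSucc (n >>> k) := rfl
    rw [h, pvTB_negSucc, pvTB_negSucc, Nat.testBit_shiftRight, Nat.add_comm]

theorem pvExt (a b : Int) (ha : 0 ≤ a) (hb : 0 ≤ b)
    (h : ∀ i, a.testBit i = b.testBit i) : a = b := by
  obtain ⟨m, rfl⟩ := Int.eq_ofNat_of_zero_le ha
  obtain ⟨n, rfl⟩ := Int.eq_ofNat_of_zero_le hb
  exact congrArg _ (Nat.eq_of_testBit_eq fun i => h i)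

theorem pvBandNonneg (a b : Int) (hb : 0 ≤ b) : 0 ≤ PySem.Int.band a b := by
  unfold PySem.Int.band
  by_cases ha : 0 ≤ a <;> simp [ha, hb]

theorem pvBxorNonneg (a b : Int) (ha : 0 ≤ a) (hb : 0 ≤ b) : 0 ≤ PySem.Int.bxor a b := by
  unfold PySem.Int.bxor
  simp [ha, hb]

theorem pvBorNonneg (a b : Int) (ha : 0 ≤ a) (hb : 0 ≤ b) : 0 ≤ PySem.Int.bor a b := by
  unfold PySem.Int.bor
  simp [ha, hb]

theorem pvShlNonneg (n : Nat) (k : Nat) : 0 ≤ ((n : Int)) <<< k := by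
  have h : ((n : Int)) <<< k = ((n <<< k : Nat) : Int) := rfl
  rw [h]; exact Int.natCast_nonneg _
def pvC : Int := 2636928640

def pvSpecBit (x : Int) (j : Nat) : Bool :=
  if h : 7 ≤ j then xor (x.testBit j) (pvSpecBit x (j - 7) && pvC.testBit j)
  else x.testBit j
termination_by j
decreasing_by omega

theorem pvSpecBit_of_ge (x : Int) (j : Nat) (h : 7 ≤ j) :
    pvSpecBit x j = xor (x.testBit j) (pvSpecBit x (j - 7) && pvC.testBit j) := by
  rw [pvSpecBit]; simp [h]

theorem pvSpecBit_of_lt (x : Int) (j : Nat) (h : ¬ 7 ≤ j) : pvSpecBit x j = x.testBit j := by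
  rw [pvSpecBit]; simp [h]

theorem pvTB_shl' (a : Int) (ha : 0 ≤ a) (k i : Nat) :
    (a <<< k).testBit i = (decide (k ≤ i) && a.testBit (i - k)) := by
  obtain ⟨m, rfl⟩ := Int.eq_ofNat_of_zero_le ha
  exact pvTB_shl m k i

theorem pvTB_zero (i : Nat) : (0 : Int).testBit i = false := by
  rw [show (0:Int) = ((0:Nat):Int) from rfl, pvTB_ofNat, Nat.zero_testBit]

theorem pvTestBitOne (i : Nat) : Nat.testBit 1 i = decide (i = 0) := by
  cases i with
  | zero => decide
  | succ n => simp [Nat.testBit_succ]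

theorem pvTB_one (i : Nat) : (1 : Int).testBit i = decide (i = 0) := by
  rw [show (1:Int) = ((1:Nat):Int) from rfl, pvTB_ofNat, pvTestBitOne]

theorem pvTB_cond (g : Bool) (i : Nat) :
    ((cond g 1 0 : Int)).testBit i = (g && decide (i = 0)) := by
  cases g
  · simp [pvTB_zero]
  · simp [pvTB_one]

theorem pvCondNonneg (g : Bool) : 0 ≤ (cond g 1 0 : Int) := by cases g <;> decide

theorem pvBandOne (a : Int) : PySem.Int.band a 1 = cond (a.testBit 0) 1 0 := by
  apply pvExt
  · exact pvBandNonneg a 1 (by decide)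
  · exact pvCondNonneg _
  · intro i
    rw [pvTB_band, pvTB_one, pvTB_cond]
    by_cases h : i = 0
    · subst h; cases a.testBit 0 <;> simp
    · simp [h]

theorem pvMaskChar (w s : Nat) (i : Nat) :
    (((2^w - 1) <<< s : Nat) : Int).testBit i = decide (s ≤ i ∧ i < s + w) := by
  rw [pvTB_ofNat, Nat.testBit_shiftLeft, Nat.testBit_two_pow_sub_one]
  by_cases h : s ≤ i
  · simp only [ge_iff_le, h, decide_true, Bool.true_and, true_and]
    exact decide_eq_decide.mpr (by omega)
  · simp [h]
theorem pvAstep (x r m : Int) (lo hi : Nat) (hr : 0 ≤ r) (hm0 : 0 ≤ m)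
    (hrc : ∀ i, r.testBit i = (decide (i < lo) && pvSpecBit x i))
    (hm : ∀ i, m.testBit i = decide (lo ≤ i ∧ i < hi))
    (hlo : lo ≤ hi) (hhi : hi ≤ lo + 7) :
    (∀ i, (PySem.Int.bxor r (PySem.Int.band (PySem.Int.bxor x (PySem.Int.band (r <<< (7:Nat)) pvC)) m)).testBit i
        = (decide (i < hi) && pvSpecBit x i)) ∧
      0 ≤ PySem.Int.bxor r (PySem.Int.band (PySem.Int.bxor x (PySem.Int.band (r <<< (7:Nat)) pvC)) m) := by
  constructor
  · intro i
    rw [pvTB_bxor, pvTB_band, pvTB_bxor, pvTB_band, pvTB_shl' r hr, hrc, hm]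
    by_cases h7 : 7 ≤ i
    · rw [hrc (i - 7), pvSpecBit_of_ge x i h7]
      by_cases h1 : i < lo
      · simp [decide_eq_false_iff_not.mpr (by omega : ¬ lo ≤ i),
          decide_eq_true (by omega : i < lo), decide_eq_true (by omega : i < hi)]
      · by_cases h2 : i < hi
        · simp [decide_eq_false_iff_not.mpr (by omega : ¬ i < lo),
            decide_eq_true (by omega : lo ≤ i), decide_eq_true h2, decide_eq_true h7,
            decide_eq_true (by omega : i - 7 < lo)]
        · simp [decide_eq_false_iff_not.mpr (by omega : ¬ i < lo),
            decide_eq_false_iff_not.mpr h2,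
            decide_eq_false_iff_not.mpr (by omega : ¬ (lo ≤ i ∧ i < hi))]
    · rw [pvSpecBit_of_lt x i h7]
      by_cases h1 : i < lo
      · simp [decide_eq_false_iff_not.mpr (by omega : ¬ lo ≤ i),
          decide_eq_true (by omega : i < lo), decide_eq_true (by omega : i < hi)]
      · by_cases h2 : i < hi
        · simp [decide_eq_false_iff_not.mpr (by omega : ¬ i < lo),
            decide_eq_true (by omega : lo ≤ i), decide_eq_true h2,
            decide_eq_false_iff_not.mpr h7]
        · simp [decide_eq_false_iff_not.mpr (by omega : ¬ i < lo),
            decide_eq_false_iff_not.mpr h2,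
            decide_eq_false_iff_not.mpr (by omega : ¬ (lo ≤ i ∧ i < hi))]
  · exact pvBxorNonneg _ _ hr (pvBandNonneg _ _ hm0)
theorem pvCondBand (b c : Bool) :
    PySem.Int.band (cond b 1 0) (cond c 1 0) = cond (b && c) 1 0 := by
  cases b <;> cases c <;> decide

theorem pvCondBxor (b c : Bool) :
    PySem.Int.bxor (cond b 1 0) (cond c 1 0) = cond (xor b c) 1 0 := by
  cases b <;> cases c <;> decide

theorem pvTB_condShl (g : Bool) (n i : Nat) :
    ((cond g 1 0 : Int) <<< n).testBit i = (decide (i = n) && g) := by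
  cases g
  · rw [cond_false, show ((0:Int)) = ((0:Nat):Int) from rfl, pvTB_shl]
    simp [Nat.zero_testBit]
  · rw [cond_true, show ((1:Int)) = ((1:Nat):Int) from rfl, pvTB_shl, pvTestBitOne]
    by_cases h : i = n
    · subst h
      simp
    · by_cases hn : n ≤ i
      · simp [decide_eq_true hn, decide_eq_false_iff_not.mpr (by omega : ¬ i - n = 0),
          decide_eq_false_iff_not.mpr h]
      · simp [decide_eq_false_iff_not.mpr hn, decide_eq_false_iff_not.mpr h]

theorem pvCondShlNonneg (g : Bool) (n : Nat) : 0 ≤ ((cond g 1 0 : Int) <<< n) := by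
  cases g
  · rw [cond_false, show ((0:Int)) = ((0:Nat):Int) from rfl]; exact pvShlNonneg 0 n
  · rw [cond_true, show ((1:Int)) = ((1:Nat):Int) from rfl]; exact pvShlNonneg 1 n

theorem pvBandShrOne (a : Int) (k : Nat) :
    PySem.Int.band (a >>> k) 1 = cond (a.testBit k) 1 0 := by
  rw [pvBandOne, pvTB_shr, Nat.zero_add]

theorem pvBstep (x r : Int) (n : Nat) (hr : 0 ≤ r)
    (hrc : ∀ i, r.testBit i = (decide (i < n) && pvSpecBit x i)) :
    (∀ i, (PySem.Int.bor r ((if 7 ≤ n then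
          PySem.Int.bxor (PySem.Int.band (x >>> n) 1)
            (PySem.Int.band (PySem.Int.band (r >>> (n - 7)) 1)
              (PySem.Int.band ((2636928640 : Int) >>> n) 1))
        else PySem.Int.band (x >>> n) 1) <<< n)).testBit i
      = (decide (i < n + 1) && pvSpecBit x i)) ∧
    0 ≤ PySem.Int.bor r ((if 7 ≤ n then
          PySem.Int.bxor (PySem.Int.band (x >>> n) 1)
            (PySem.Int.band (PySem.Int.band (r >>> (n - 7)) 1)
              (PySem.Int.band ((2636928640 : Int) >>> n) 1))
        else PySem.Int.band (x >>> n) 1) <<< n) := by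
  have hbit : (if 7 ≤ n then
          PySem.Int.bxor (PySem.Int.band (x >>> n) 1)
            (PySem.Int.band (PySem.Int.band (r >>> (n - 7)) 1)
              (PySem.Int.band ((2636928640 : Int) >>> n) 1))
        else PySem.Int.band (x >>> n) 1) = cond (pvSpecBit x n) 1 0 := by
    by_cases h7 : 7 ≤ n
    · rw [if_pos h7, pvBandShrOne, pvBandShrOne, pvBandShrOne,
        show ((2636928640:Int)) = pvC from rfl, pvCondBand, pvCondBxor,
        hrc (n - 7), decide_eq_true (by omega : n - 7 < n), Bool.true_and,
        pvSpecBit_of_ge x n h7]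
    · rw [if_neg h7, pvBandShrOne, pvSpecBit_of_lt x n h7]
  rw [hbit]
  constructor
  · intro i
    rw [pvTB_bor, hrc, pvTB_condShl]
    by_cases h1 : i < n
    · simp [decide_eq_true h1, decide_eq_false_iff_not.mpr (by omega : ¬ i = n)]
      exact fun _ => by omega
    · by_cases h2 : i = n
      · subst h2
        simp
      · simp [decide_eq_false_iff_not.mpr h1, decide_eq_false_iff_not.mpr h2]
        exact fun h => by omega
  · exact pvBorNonneg _ _ hr (pvCondShlNonneg _ _)

theorem pvAchar (x : Int) :
    (∀ i, (invert_second_transformation_py x).testBit i = (decide (i < 32) && pvSpecBit x i)) ∧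
      0 ≤ invert_second_transformation_py x := by
  have h0 : ∀ i, (0:Int).testBit i = (decide (i < 0) && pvSpecBit x i) := fun i => by
    simp [pvTB_zero]
  have m1 : ∀ i, (0x0000007f : Int).testBit i = decide (0 ≤ i ∧ i < 7) := fun i => by
    rw [show (0x0000007f:Int) = (((2^7 - 1) <<< 0 : Nat) : Int) by decide]
    exact pvMaskChar 7 0 i
  have m2 : ∀ i, (0x00003f80 : Int).testBit i = decide (7 ≤ i ∧ i < 14) := fun i => by
    rw [show (0x00003f80:Int) = (((2^7 - 1) <<< 7 : Nat) : Int) by decide]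
    exact pvMaskChar 7 7 i
  have m3 : ∀ i, (0x001fc000 : Int).testBit i = decide (14 ≤ i ∧ i < 21) := fun i => by
    rw [show (0x001fc000:Int) = (((2^7 - 1) <<< 14 : Nat) : Int) by decide]
    exact pvMaskChar 7 14 i
  have m4 : ∀ i, (0x0fe00000 : Int).testBit i = decide (21 ≤ i ∧ i < 28) := fun i => by
    rw [show (0x0fe00000:Int) = (((2^7 - 1) <<< 21 : Nat) : Int) by decide]
    exact pvMaskChar 7 21 i
  have m5 : ∀ i, (0xf0000000 : Int).testBit i = decide (28 ≤ i ∧ i < 32) := fun i => by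
    rw [show (0xf0000000:Int) = (((2^4 - 1) <<< 28 : Nat) : Int) by decide]
    exact pvMaskChar 4 28 i
  have s1 := pvAstep x 0 0x0000007f 0 7 (by decide) (by decide) h0 m1 (by omega) (by omega)
  have s2 := pvAstep x _ 0x00003f80 7 14 s1.2 (by decide) s1.1 m2 (by omega) (by omega)
  have s3 := pvAstep x _ 0x001fc000 14 21 s2.2 (by decide) s2.1 m3 (by omega) (by omega)
  have s4 := pvAstep x _ 0x0fe00000 21 28 s3.2 (by decide) s3.1 m4 (by omega) (by omega)
  have s5 := pvAstep x _ 0xf0000000 28 32 s4.2 (by decide) s4.1 m5 (by omega) (by omega)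
  exact s5

theorem pvBfold (x : Int) (n : Nat) :
    (∀ i, (((List.range n).foldl (fun (result : Int) (i : Nat) =>
        let bit := PySem.Int.band (x >>> i) 1
        let bit := if 7 ≤ i then
            PySem.Int.bxor bit (PySem.Int.band (PySem.Int.band (result >>> (i - 7)) 1)
              (PySem.Int.band ((2636928640 : Int) >>> i) 1))
          else bit
        PySem.Int.bor result (bit <<< i)) 0)).testBit i
      = (decide (i < n) && pvSpecBit x i)) ∧
    0 ≤ (List.range n).foldl (fun (result : Int) (i : Nat) =>
        let bit := PySem.Int.band (x >>> i) 1
        let bit := if 7 ≤ i then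
            PySem.Int.bxor bit (PySem.Int.band (PySem.Int.band (result >>> (i - 7)) 1)
              (PySem.Int.band ((2636928640 : Int) >>> i) 1))
          else bit
        PySem.Int.bor result (bit <<< i)) 0 := by
  induction n with
  | zero =>
    refine ⟨fun i => by simp [List.range_zero, pvTB_zero], by simp [List.range_zero]⟩
  | succ n ih =>
    rw [List.range_succ, List.foldl_append, List.foldl_cons, List.foldl_nil]
    exact pvBstep x _ n ih.2 ih.1

-- ===== VERDICT (by name: the statement is the Claim_ definition above) =====
theorem invert_second_transformation_py_spec : Claim_equal_invert_second_transformation_py := by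
  intro x _
  unfold Spec_invert_second_transformation_py
  have hA := pvAchar x
  have hB := pvBfold x 32
  unfold invert_second_transformation_py_alt
  exact pvExt _ _ hA.2 hB.2 (fun i => (hA.1 i).trans (hB.1 i).symm)
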